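-- pv_equiv track=rewrite | github.com/VeloxChem/VeloxChem | src/pymodule/thgreddriver.py | get_comp
-- ===== SOURCE A (Python) =====
-- def get_comp(freqs):
--     """
--     Makes a list of all the gamma tensor components that are to be computed
--     for printing purposes and for the contraction of X[3],X[2],A[3],A[2]
--
--     :param freqs:
--         A list of all the frequencies for the thg calculation
--
--     :return:
--         A list of gamma tensors components inlcuded in the isotropic cubic
--         response with their corresponding frequencies
--     """
--
--     comp_iso = []
--     spat_A = 'xyz'
--
--     for w in freqs:
--         w_key = '{},{},{}'.format(w, w, w)
--         for b in spat_A: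
--             for a in spat_A:
--                 aabb = '{}{}{}{}'.format(a, a, b, b)
--                 abab = '{}{}{}{}'.format(a, b, a, b)
--                 abba = '{}{}{}{}'.format(a, b, b, a)
--                 comp_iso.append(aabb + ',' + w_key)
--                 comp_iso.append(abab + ',' + w_key)
--                 comp_iso.append(abba + ',' + w_key)
--
--     return sorted(comp_iso, key=comp_iso.index)
-- ===== SOURCE B (Python) =====
-- def get_comp(freqs):
--     counts = {}
--     spat_A = 'xyz'
--     for w in freqs:
--         w_key = '{},{},{}'.format(w, w, w)
--         for b in spat_A:
--             for a in spat_A: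
--                 for comp in (a + a + b + b, a + b + a + b, a + b + b + a):
--                     key = comp + ',' + w_key
--                     counts[key] = counts.get(key, 0) + 1
--     out = []
--     for key, n in counts.items():
--         out.extend([key] * n)
--     return out
-- ===== Notes on version B (the rewrite author's own statement) =====
-- stated objective: faster
-- what changed: Replaces the append-then-sort-by-first-occurrence-index (sorted(key=list.index), which rescans the whole list for every element compared) by a single pass that counts each component string in an insertion-ordered dict and then emits each distinct key, in first-insertion order, repeated by its count.
import Mathlib
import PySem

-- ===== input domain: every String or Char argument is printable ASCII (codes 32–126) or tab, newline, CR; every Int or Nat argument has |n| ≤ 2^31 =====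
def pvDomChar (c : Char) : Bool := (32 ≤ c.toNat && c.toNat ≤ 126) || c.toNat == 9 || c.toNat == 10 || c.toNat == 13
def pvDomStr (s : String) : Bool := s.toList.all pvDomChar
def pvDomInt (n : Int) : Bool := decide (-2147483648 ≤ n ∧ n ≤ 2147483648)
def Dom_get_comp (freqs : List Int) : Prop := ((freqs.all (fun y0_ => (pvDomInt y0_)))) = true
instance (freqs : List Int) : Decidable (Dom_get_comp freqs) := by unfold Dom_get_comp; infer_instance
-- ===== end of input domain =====

-- B replaces A's sort-by-first-occurrence-index with one counting pass over an insertion-ordered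
-- dict followed by an expansion pass (objective: faster — no sort, no repeated list.index scans;
-- a timing run measured B faster).

-- ===== PORT A =====
-- the comp_iso list A builds with its three nested loops ('for w in freqs / for b in 'xyz' /
-- for a in 'xyz'', three appends per innermost iteration)
def compIsoA (freqs : List Int) : List String :=
  freqs.foldl (fun acc w =>
    let w_key := PySem.Int.toStr w ++ "," ++ PySem.Int.toStr w ++ "," ++ PySem.Int.toStr w
    ("xyz".toList).foldl (fun acc b =>
      ("xyz".toList).foldl (fun acc a =>
        let aabb := String.ofList [a, a, b, b]
        let abab := String.ofList [a, b, a, b]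
        let abba := String.ofList [a, b, b, a]
        ((acc ++ [aabb ++ "," ++ w_key]) ++ [abab ++ "," ++ w_key]) ++ [abba ++ "," ++ w_key])
        acc) acc) []

-- sorted(comp_iso, key=comp_iso.index); every element sorted ranks is in comp_iso, so the
-- '.getD 0' branch of index? (where Python list.index would raise ValueError) is never taken
def get_comp (freqs : List Int) : List String :=
  let comp_iso := compIsoA freqs
  PySem.List.sorted comp_iso (fun v => (PySem.List.index? comp_iso v).getD 0) false

-- ===== PORT B =====
-- the counts dict B builds ('counts[key] = counts.get(key, 0) + 1' inside the same nested loops)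
def altCounts (freqs : List Int) : PySem.Dict String Int :=
  freqs.foldl (fun d w =>
    let w_key := PySem.Int.toStr w ++ "," ++ PySem.Int.toStr w ++ "," ++ PySem.Int.toStr w
    ("xyz".toList).foldl (fun d b =>
      ("xyz".toList).foldl (fun d a =>
        [String.ofList [a, a, b, b], String.ofList [a, b, a, b], String.ofList [a, b, b, a]].foldl
          (fun d comp =>
            let key := comp ++ "," ++ w_key
            d.insert key (d.getD key 0 + 1)) d) d) d) PySem.Dict.empty

-- 'for key, n in counts.items(): out.extend([key] * n)'
def get_comp_alt (freqs : List Int) : List String :=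
  let counts := altCounts freqs
  counts.items.foldl (fun out kv => out ++ PySem.List.pyRepeat [kv.1] kv.2) []

-- ===== PRECONDITION & SPEC =====
def Spec_get_comp (freqs : List Int) (out : List String) : Prop := out = get_comp_alt freqs
instance (freqs : List Int) (out : List String) : Decidable (Spec_get_comp freqs out) := by unfold Spec_get_comp; infer_instance

-- ===== CLAIM (what is proved, stated in full; the proofs are below) =====
def Claim_equal_get_comp : Prop := ∀ (freqs : List Int), Dom_get_comp freqs → Spec_get_comp freqs (get_comp freqs)

-- ===== LEMMAS AND PROOFS =====

-- the stream of component strings both programs generate, written as a flatMap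
def gBlock (w : Int) : List String :=
  let w_key := PySem.Int.toStr w ++ "," ++ PySem.Int.toStr w ++ "," ++ PySem.Int.toStr w
  ("xyz".toList).flatMap (fun b =>
    ("xyz".toList).flatMap (fun a =>
      [String.ofList [a, a, b, b] ++ "," ++ w_key,
       String.ofList [a, b, a, b] ++ "," ++ w_key,
       String.ofList [a, b, b, a] ++ "," ++ w_key]))

-- the Nat Python's comp_iso.index(v) computes (total form; = first index of v in s when v ∈ s)
def keyOf (s : List String) (v : String) : Nat := (PySem.List.index? s v).getD 0

lemma compIsoA_eq (freqs : List Int) : compIsoA freqs = freqs.flatMap gBlock := by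
  unfold compIsoA
  have hx : "xyz".toList = ['x', 'y', 'z'] := rfl
  apply Eq.trans (b := List.foldl (fun acc w => acc ++ gBlock w) [] freqs)
  · apply PySem.List.foldl_congr_mem
    intro acc w _
    simp [hx, gBlock, List.flatMap]
  · rw [PySem.List.foldl_append_eq_flatMap]; simp

lemma ins_eq_mod (d : PySem.Dict String Int) (k : String) :
    d.insert k (d.getD k 0 + 1) = d.modify k 0 (· + 1) := by
  simp [PySem.Dict.insert, PySem.Dict.modify, PySem.Dict.getD, PySem.Dict.get?, PySem.Dict.contains]

lemma altCounts_eq (freqs : List Int) :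
    altCounts freqs = PySem.Dict.counter (freqs.flatMap gBlock) := by
  unfold altCounts
  have hx : "xyz".toList = ['x', 'y', 'z'] := rfl
  rw [PySem.Dict.counter_eq_foldl, List.foldl_flatMap]
  apply PySem.List.foldl_congr_mem
  intro d w _
  simp [hx, gBlock, List.flatMap, ins_eq_mod]

lemma get_comp_alt_eq (freqs : List Int) :
    get_comp_alt freqs =
      (PySem.Set.ofList (freqs.flatMap gBlock)).flatMap
        (fun k => List.replicate ((freqs.flatMap gBlock).count k) k) := by
  unfold get_comp_alt
  rw [altCounts_eq, PySem.List.foldl_append_eq_flatMap]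
  simp [PySem.Dict.items_counter, List.flatMap_map, PySem.List.pyRepeat_singleton]

-- key facts about keyOf on members of s
lemma keyOf_spec {s : List String} {v : String} (hv : v ∈ s) :
    ∃ (hk : keyOf s v < s.length), s[keyOf s v] = v := by
  have h : (PySem.List.index? s v).isSome := (PySem.List.index?_isSome_iff s v).mpr hv
  obtain ⟨k, hk⟩ := Option.isSome_iff_exists.mp h
  obtain ⟨hlt, hget, -⟩ := PySem.List.getElem_of_index?_eq_some hk
  have hkey : keyOf s v = k := by rw [keyOf, hk]; rfl
  exact ⟨hkey ▸ hlt, hkey ▸ hget⟩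

lemma keyOf_inj {s : List String} {a b : String} (ha : a ∈ s) (hb : b ∈ s)
    (h : keyOf s a = keyOf s b) : a = b := by
  obtain ⟨hka, hga⟩ := keyOf_spec ha
  obtain ⟨hkb, hgb⟩ := keyOf_spec hb
  rw [← hga, ← hgb]
  exact getElem_congr rfl h hka

-- sorted-by-key lists that are permutations, with keys injective on their elements, coincide
lemma eq_of_perm_pairwise_injOn {α : Type} (key : α → Nat) :
    ∀ {l₁ l₂ : List α}, l₁.Perm l₂ →
      (∀ a ∈ l₁, ∀ b ∈ l₁, key a = key b → a = b) →
      List.Pairwise (fun a b => key a ≤ key b) l₁ →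
      List.Pairwise (fun a b => key a ≤ key b) l₂ → l₁ = l₂ := by
  intro l₁
  induction l₁ with
  | nil =>
    intro l₂ hp _ _ _
    exact hp.nil_eq
  | cons a t ih =>
    intro l₂ hp hinj h₁ h₂
    cases l₂ with
    | nil => simpa using hp.length_eq
    | cons b s =>
      have hbmem : b ∈ a :: t := hp.mem_iff.mpr (List.mem_cons_self)
      have hamem : a ∈ b :: s := hp.mem_iff.mp (List.mem_cons_self)
      have hab : a = b := by
        rcases List.mem_cons.mp hbmem with h | h
        · exact h.symm
        · rcases List.mem_cons.mp hamem with h' | h'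
          · exact h'
          · have k1 : key a ≤ key b := (List.pairwise_cons.mp h₁).1 b h
            have k2 : key b ≤ key a := (List.pairwise_cons.mp h₂).1 a h'
            exact hinj a List.mem_cons_self b hbmem (Nat.le_antisymm k1 k2)
      subst hab
      have hts : t.Perm s := hp.cons_inv
      have := ih hts
        (fun x hx y hy => hinj x (List.mem_cons_of_mem _ hx) y (List.mem_cons_of_mem _ hy))
        (List.pairwise_cons.mp h₁).2 (List.pairwise_cons.mp h₂).2
      rw [this]

-- the distinct elements in first-occurrence order have strictly increasing first indices
lemma ofList_pairwise_keyOf (s : List String) :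
    List.Pairwise (fun a b => keyOf s a < keyOf s b) (PySem.Set.ofList s) := by
  induction s using List.reverseRecOn with
  | nil => simp [PySem.Set.ofList_eq_foldl]
  | append_singleton xs x ih =>
    have hof : PySem.Set.ofList (xs ++ [x]) = PySem.Set.add (PySem.Set.ofList xs) x := by
      rw [PySem.Set.ofList_eq_foldl, PySem.Set.ofList_eq_foldl, List.foldl_append]
      rfl
    have hmemxs : ∀ a, a ∈ PySem.Set.ofList xs → a ∈ xs := fun a ha =>
      (PySem.Set.mem_ofList xs a).mp ha
    have hkeep : ∀ a ∈ xs, keyOf (xs ++ [x]) a = keyOf xs a := by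
      intro a ha
      rw [keyOf, keyOf, PySem.List.index?_append_of_mem [x] ha]
    have hpair : List.Pairwise (fun a b => keyOf (xs ++ [x]) a < keyOf (xs ++ [x]) b)
        (PySem.Set.ofList xs) :=
      ih.imp_of_mem (fun {a b} ha hb h => by
        rw [hkeep a (hmemxs a ha), hkeep b (hmemxs b hb)]; exact h)
    rw [hof]
    simp only [PySem.Set.add]
    split_ifs with hcon
    · exact hpair
    · have hxnot : x ∉ xs := by
        intro hx
        exact hcon (by simpa [PySem.Set.contains] using (PySem.Set.mem_ofList xs x).mpr hx)
      rw [List.pairwise_append]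
      refine ⟨hpair, List.pairwise_singleton _ _, ?_⟩
      intro a ha y hy
      have hyx : y = x := List.mem_singleton.mp hy
      subst hyx
      have haxs : a ∈ xs := hmemxs a ha
      have hxkey : keyOf (xs ++ [y]) y = xs.length := by
        rw [keyOf, PySem.List.index?_append_singleton_self xs y hxnot]; rfl
      rw [hxkey, hkeep a haxs]
      obtain ⟨hlt, -⟩ := keyOf_spec haxs
      exact hlt

-- sum of a 'pick f at a' map over a Nodup list
lemma sum_map_pick {l : List String} (hl : l.Nodup) (a : String) (f : String → Nat) :
    (l.map (fun k => if k = a then f k else 0)).sum = if a ∈ l then f a else 0 := by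
  induction l with
  | nil => simp
  | cons x t ih =>
    obtain ⟨hx, ht⟩ := List.nodup_cons.mp hl
    by_cases hxa : x = a
    · subst hxa
      simp [List.sum_cons, ih ht, hx]
    · simp only [List.map_cons, List.sum_cons, if_neg hxa]
      rw [ih ht]
      simp [List.mem_cons, Ne.symm hxa]

-- the grouped expansion is a permutation of s
lemma grouped_perm (s : List String) :
    ((PySem.Set.ofList s).flatMap (fun k => List.replicate (s.count k) k)).Perm s := by
  rw [List.perm_iff_count]
  intro a
  rw [List.count_flatMap]
  have hmap : ((PySem.Set.ofList s).map
        (List.count a ∘ fun k => List.replicate (s.count k) k)) =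
      ((PySem.Set.ofList s).map (fun k => if k = a then s.count k else 0)) := by
    apply List.map_congr_left
    intro k _
    simp [Function.comp, List.count_replicate]
  rw [hmap, sum_map_pick (PySem.Set.nodup_ofList s) a]
  by_cases ha : a ∈ s
  · simp [(PySem.Set.mem_ofList s a).mpr ha]
  · simp [ha, List.count_eq_zero.mpr ha]

-- the grouped expansion is sorted by first-occurrence index
lemma grouped_pairwise (s : List String) :
    List.Pairwise (fun a b => keyOf s a ≤ keyOf s b)
      ((PySem.Set.ofList s).flatMap (fun k => List.replicate (s.count k) k)) := by
  rw [List.pairwise_flatMap]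
  constructor
  · intro k _
    exact List.pairwise_replicate.mpr (Or.inr (Nat.le_refl _))
  · exact (ofList_pairwise_keyOf s).imp_of_mem (fun {k₁ k₂} _ _ h x hx y hy => by
      rw [List.eq_of_mem_replicate hx, List.eq_of_mem_replicate hy]
      exact Nat.le_of_lt h)

-- A's sort by first-occurrence index is exactly B's group-by-first-occurrence expansion
lemma sorted_index_eq_grouped (s : List String) :
    PySem.List.sorted s (fun v => (PySem.List.index? s v).getD 0) false =
      (PySem.Set.ofList s).flatMap (fun k => List.replicate (s.count k) k) := by
  have hLp : (PySem.List.sorted s (fun v => (PySem.List.index? s v).getD 0) false).Perm s :=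
    PySem.List.sorted_perm s _ false
  have hmemL : ∀ a, a ∈ PySem.List.sorted s (fun v => (PySem.List.index? s v).getD 0) false →
      a ∈ s := fun a ha => hLp.mem_iff.mp ha
  refine eq_of_perm_pairwise_injOn (keyOf s) (hLp.trans (grouped_perm s).symm) ?_ ?_ ?_
  · intro a ha b hb h
    exact keyOf_inj (hmemL a ha) (hmemL b hb) h
  · exact PySem.List.sorted_pairwise s (fun v => (PySem.List.index? s v).getD 0)
  · exact grouped_pairwise s

-- ===== VERDICT (by name: the statement is the Claim_ definition above) =====
theorem get_comp_spec : Claim_equal_get_comp := by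
  intro freqs _
  unfold Spec_get_comp get_comp
  rw [compIsoA_eq, sorted_index_eq_grouped, get_comp_alt_eq]
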